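-- pv_equiv track=rewrite | github.com/JorgeGuzz/generacion_poligonos | poligonos/generacion_poligonos.py | dividir_cluster
-- ===== SOURCE A (Python) =====
-- def dividir_cluster(cluster, cluster_info, umbral_toneladas):
--     """
--     Recibe un cluster (conjunto de coordenadas) y su diccionario 'cluster_info' (con datos de cada bloque),
--     y si el total de TONNES excede 2 * umbral_toneladas, lo divide en dos subclusters a lo largo del eje de simetría.
--
--     Se selecciona el eje (vertical u horizontal) que favorezca una forma lo más cuadrada posible.
--     La función se aplica de forma recursiva.
--
--     Devuelve:
--       - Una lista de clusters resultantes (cada uno es un conjunto de coordenadas).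
--       - Una lista con la suma de TONNES de cada cluster resultante.
--     """
--     # Calcular la suma total de TONNES del cluster actual
--     suma = sum(cluster_info[b]['TONNES'] for b in cluster)
--     if suma <= 2 * umbral_toneladas:
--         return [cluster], [suma]
--
--     # Determinar los límites del cluster
--     xs = [b[0] for b in cluster]
--     ys = [b[1] for b in cluster]
--     min_x, max_x = min(xs), max(xs)
--     min_y, max_y = min(ys), max(ys)
--     width = max_x - min_x + 1
--     height = max_y - min_y + 1
--
--     # Dividir en dos subclusters según la dimensión dominante
--     cluster1 = set()
--     cluster2 = set()
--     info1 = {}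
--     info2 = {}
--
--     if width >= height:
--         # División vertical (por eje X)
--         x_split = (min_x + max_x) // 2
--         for bloque in cluster:
--             if bloque[0] <= x_split:
--                 cluster1.add(bloque)
--                 info1[bloque] = cluster_info[bloque]
--             else:
--                 cluster2.add(bloque)
--                 info2[bloque] = cluster_info[bloque]
--     else:
--         # División horizontal (por eje Y)
--         y_split = (min_y + max_y) // 2
--         for bloque in cluster:
--             if bloque[1] <= y_split:
--                 cluster1.add(bloque)
--                 info1[bloque] = cluster_info[bloque]
--             else:
--                 cluster2.add(bloque)
--                 info2[bloque] = cluster_info[bloque]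
--
--     # Aplicar recursividad en cada subcluster (si es necesario)
--     clusters_finales = []
--     toneladas_finales = []
--     for subcluster, subinfo in [(cluster1, info1), (cluster2, info2)]:
--         sub_suma = sum(subinfo[b]['TONNES'] for b in subcluster)
--         if sub_suma > 2 * umbral_toneladas:
--             sub_clusters, sub_tonnes = dividir_cluster(subcluster, subinfo, umbral_toneladas)
--             clusters_finales.extend(sub_clusters)
--             toneladas_finales.extend(sub_tonnes)
--         else:
--             clusters_finales.append(subcluster)
--             toneladas_finales.append(sub_suma)
--
--     return clusters_finales, toneladas_finales
-- ===== SOURCE B (Python) =====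
-- def dividir_cluster(cluster, cluster_info, umbral_toneladas):
--     """Iterative worklist version: an explicit DFS stack replaces A's recursion;
--     popping left halves first reproduces A's pre-order list of leaves."""
--     clusters_finales = []
--     toneladas_finales = []
--     stack = [(cluster, cluster_info)]
--     while stack:
--         c, ci = stack.pop()
--         suma = sum(ci[b]['TONNES'] for b in c)
--         if suma <= 2 * umbral_toneladas:
--             clusters_finales.append(c)
--             toneladas_finales.append(suma)
--             continue
--         xs = [b[0] for b in c]
--         ys = [b[1] for b in c]
--         if max(xs) - min(xs) >= max(ys) - min(ys):
--             s = (min(xs) + max(xs)) // 2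
--             c1 = {b for b in c if b[0] <= s}
--             c2 = {b for b in c if b[0] > s}
--         else:
--             s = (min(ys) + max(ys)) // 2
--             c1 = {b for b in c if b[1] <= s}
--             c2 = {b for b in c if b[1] > s}
--         # push the right half first so the left half is processed first (DFS pre-order)
--         stack.append((c2, {b: ci[b] for b in c2}))
--         stack.append((c1, {b: ci[b] for b in c1}))
--     return clusters_finales, toneladas_finales
-- ===== Notes on version B (the rewrite author's own statement) =====
-- stated objective: alternative
-- what changed: A's self-recursion (with a per-child pre-check before each recursive call) is replaced by an iterative worklist: a single while-loop pops (cluster, info) pairs off an explicit DFS stack, appending leaves to the result lists and pushing the right half before the left so A's pre-order of leaves is reproduced.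
import Mathlib
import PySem

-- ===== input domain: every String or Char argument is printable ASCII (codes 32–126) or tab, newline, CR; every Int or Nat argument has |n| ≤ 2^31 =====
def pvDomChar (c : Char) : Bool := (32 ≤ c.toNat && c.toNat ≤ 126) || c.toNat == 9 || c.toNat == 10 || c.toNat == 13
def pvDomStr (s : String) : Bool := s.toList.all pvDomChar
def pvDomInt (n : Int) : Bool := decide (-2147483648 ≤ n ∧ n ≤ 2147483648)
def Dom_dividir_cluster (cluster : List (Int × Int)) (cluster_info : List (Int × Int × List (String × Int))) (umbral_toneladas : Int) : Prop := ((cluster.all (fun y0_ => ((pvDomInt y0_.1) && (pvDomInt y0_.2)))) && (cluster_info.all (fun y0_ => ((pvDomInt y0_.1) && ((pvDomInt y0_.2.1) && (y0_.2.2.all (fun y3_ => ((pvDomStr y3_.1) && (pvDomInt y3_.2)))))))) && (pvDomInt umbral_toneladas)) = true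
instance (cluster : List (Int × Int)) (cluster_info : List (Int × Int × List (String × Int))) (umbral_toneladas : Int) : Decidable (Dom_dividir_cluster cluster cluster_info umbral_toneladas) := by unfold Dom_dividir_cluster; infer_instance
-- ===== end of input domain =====

-- B replaces A's recursion by an iterative worklist (explicit DFS stack, right half pushed
-- first) — same leaves in the same pre-order; objective: alternative decomposition, no speed claim.
-- Note: `cluster` is a Python set (distinct coordinates) and both ports use fuel only to make
-- Python's unbounded recursion/loop total in Lean; Pre_ excludes the inputs where Python raises.

-- ===== PORT A =====
-- cluster_info[b]  (first matching key; [] stands for Python's KeyError, excluded by Pre_)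
def pvInfoGet (ci : List (Int × Int × List (String × Int))) (b : Int × Int) : List (String × Int) :=
  match ci with
  | [] => []
  | e :: t => if e.1 = b.1 ∧ e.2.1 = b.2 then e.2.2 else pvInfoGet t b

-- inner['TONNES']  (0 stands for Python's KeyError, excluded by Pre_)
def pvTon (inner : List (String × Int)) : Int :=
  match inner with
  | [] => 0
  | e :: t => if e.1 = "TONNES" then e.2 else pvTon t

-- sum(ci[b]['TONNES'] for b in c)
def pvSuma (ci : List (Int × Int × List (String × Int))) (c : List (Int × Int)) : Int :=
  c.foldl (fun acc b => acc + pvTon (pvInfoGet ci b)) 0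

def pvMinI (l : List Int) : Int := (PySem.List.min? l (fun y => y)).getD 0
def pvMaxI (l : List Int) : Int := (PySem.List.max? l (fun y => y)).getD 0

-- d[k] = v  (Python dict assignment: overwrite in place, else append)
def pvDictInsert (d : List (Int × Int × List (String × Int))) (k : Int × Int) (v : List (String × Int)) : List (Int × Int × List (String × Int)) :=
  match d with
  | [] => [(k.1, k.2, v)]
  | e :: t => if e.1 = k.1 ∧ e.2.1 = k.2 then (k.1, k.2, v) :: t else e :: pvDictInsert t k v

-- A's split loop: one pass over cluster filling (cluster1, info1, cluster2, info2);
-- p is the branch test (b[0] <= x_split, resp. b[1] <= y_split)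
def pvSplitLoop (ci : List (Int × Int × List (String × Int))) (p : Int × Int → Prop) [DecidablePred p] (c : List (Int × Int)) :
    List (Int × Int) × List (Int × Int × List (String × Int)) × List (Int × Int) × List (Int × Int × List (String × Int)) :=
  c.foldl (fun st bloque =>
    if p bloque then
      (PySem.Set.add st.1 bloque, pvDictInsert st.2.1 bloque (pvInfoGet ci bloque), st.2.2.1, st.2.2.2)
    else
      (st.1, st.2.1, PySem.Set.add st.2.2.1 bloque, pvDictInsert st.2.2.2 bloque (pvInfoGet ci bloque)))
    ([], [], [], [])

-- A's recursion, made total with fuel (Python recurses unboundedly where the fuel runs out;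
-- Pre_ guarantees fuel `cluster.length` is never exhausted)
def dividir_go : Nat → List (Int × Int) → List (Int × Int × List (String × Int)) → Int → (List (List (Int × Int))) × List Int
  | 0, cluster, cluster_info, _ => ([cluster], [pvSuma cluster_info cluster])
  | fuel + 1, cluster, cluster_info, umbral =>
    let suma := pvSuma cluster_info cluster
    if suma ≤ 2 * umbral then ([cluster], [suma])
    else
      let xs := cluster.map (fun b => b.1)
      let ys := cluster.map (fun b => b.2)
      let min_x := pvMinI xs
      let max_x := pvMaxI xs
      let min_y := pvMinI ys
      let max_y := pvMaxI ys
      let width := max_x - min_x + 1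
      let height := max_y - min_y + 1
      let st :=
        if width ≥ height then
          pvSplitLoop cluster_info (fun b => b.1 ≤ PySem.Int.floordiv (min_x + max_x) 2) cluster
        else
          pvSplitLoop cluster_info (fun b => b.2 ≤ PySem.Int.floordiv (min_y + max_y) 2) cluster
      -- final loop over [(cluster1, info1), (cluster2, info2)], unrolled
      let r1 :=
        if 2 * umbral < pvSuma st.2.1 st.1 then dividir_go fuel st.1 st.2.1 umbral
        else ([st.1], [pvSuma st.2.1 st.1])
      let r2 :=
        if 2 * umbral < pvSuma st.2.2.2 st.2.2.1 then dividir_go fuel st.2.2.1 st.2.2.2 umbral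
        else ([st.2.2.1], [pvSuma st.2.2.2 st.2.2.1])
      (r1.1 ++ r2.1, r1.2 ++ r2.2)

def dividir_cluster (cluster : List (Int × Int)) (cluster_info : List (Int × Int × List (String × Int))) (umbral_toneladas : Int) : (List (List (Int × Int))) × List Int :=
  dividir_go cluster.length cluster cluster_info umbral_toneladas

-- ===== PORT B =====
-- {b: ci[b] for b in l}  (keys of l are distinct: l is a Python set)
def pvDMap (ci : List (Int × Int × List (String × Int))) (l : List (Int × Int)) : List (Int × Int × List (String × Int)) :=
  l.map (fun b => (b.1, b.2, pvInfoGet ci b))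

-- B's while-loop over the explicit stack, made total with fuel (the loop runs forever in
-- Python where the fuel runs out; Pre_ guarantees fuel 2*|cluster|+1 is never exhausted)
def dividir_alt_loop : Nat → List ((List (Int × Int)) × List (Int × Int × List (String × Int))) → Int → (List (List (Int × Int))) × List Int → (List (List (Int × Int))) × List Int
  | _, [], _, acc => acc
  | 0, _ :: _, _, acc => acc
  | fuel + 1, (c, ci) :: rest, umbral, acc =>
    let suma := pvSuma ci c
    if suma ≤ 2 * umbral then
      dividir_alt_loop fuel rest umbral (acc.1 ++ [c], acc.2 ++ [suma])
    else
      let xs := c.map (fun b => b.1)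
      let ys := c.map (fun b => b.2)
      if pvMaxI xs - pvMinI xs ≥ pvMaxI ys - pvMinI ys then
        let s := PySem.Int.floordiv (pvMinI xs + pvMaxI xs) 2
        let c1 := PySem.Set.ofList (c.filter (fun b => decide (b.1 ≤ s)))
        let c2 := PySem.Set.ofList (c.filter (fun b => decide (s < b.1)))
        dividir_alt_loop fuel ((c1, pvDMap ci c1) :: (c2, pvDMap ci c2) :: rest) umbral acc
      else
        let s := PySem.Int.floordiv (pvMinI ys + pvMaxI ys) 2
        let c1 := PySem.Set.ofList (c.filter (fun b => decide (b.2 ≤ s)))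
        let c2 := PySem.Set.ofList (c.filter (fun b => decide (s < b.2)))
        dividir_alt_loop fuel ((c1, pvDMap ci c1) :: (c2, pvDMap ci c2) :: rest) umbral acc

def dividir_cluster_alt (cluster : List (Int × Int)) (cluster_info : List (Int × Int × List (String × Int))) (umbral_toneladas : Int) : (List (List (Int × Int))) × List Int :=
  dividir_alt_loop (2 * cluster.length + 1) [(cluster, cluster_info)] umbral_toneladas ([], [])

-- ===== PRECONDITION & SPEC =====
-- cluster_info[b]['TONNES'] as a first-match association-list lookup (none = KeyError)
def pvTonnes? (ci : List (Int × Int × List (String × Int))) (b : Int × Int) : Option Int :=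
  ((ci.map (fun e => ((e.1, e.2.1), e.2.2))).lookup b).bind (fun v => v.lookup "TONNES")

-- Pre_ excludes (i) duplicate coordinates (cluster is a Python set, so its List rendering has
-- distinct elements), (ii) blocks missing from cluster_info or without a 'TONNES' entry
-- (Python raises KeyError), (iii) the empty cluster with 0 > 2*umbral (Python raises
-- ValueError on min([])), and (iv) clusters containing a single block heavier than
-- 2*umbral_toneladas — the closed-form guarantee that A's recursion terminates: A splits any
-- overweight cluster, so a heavy block drives an unbounded recursion once isolated
-- (RecursionError); A returns despite a heavy block only when negative tonnages hide it.
def Pre_dividir_cluster (cluster : List (Int × Int)) (cluster_info : List (Int × Int × List (String × Int))) (umbral_toneladas : Int) : Prop :=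
  cluster.Nodup ∧ (cluster = [] → 0 ≤ umbral_toneladas) ∧
    ∀ b ∈ cluster, pvTonnes? cluster_info b ≠ none ∧
      (pvTonnes? cluster_info b).getD 0 ≤ 2 * umbral_toneladas
instance (cluster : List (Int × Int)) (cluster_info : List (Int × Int × List (String × Int))) (umbral_toneladas : Int) : Decidable (Pre_dividir_cluster cluster cluster_info umbral_toneladas) := by unfold Pre_dividir_cluster; infer_instance

def pvWitness_dividir_cluster : (List (Int × Int)) × (List (Int × Int × List (String × Int))) × Int :=
  ([(0, 0), (1, 0)], [(0, 0, [("TONNES", 1)]), (1, 0, [("TONNES", 2)])], 1)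

def Spec_dividir_cluster (cluster : List (Int × Int)) (cluster_info : List (Int × Int × List (String × Int))) (umbral_toneladas : Int) (out : (List (List (Int × Int))) × List Int) : Prop := out = dividir_cluster_alt cluster cluster_info umbral_toneladas
instance (cluster : List (Int × Int)) (cluster_info : List (Int × Int × List (String × Int))) (umbral_toneladas : Int) (out : (List (List (Int × Int))) × List Int) : Decidable (Spec_dividir_cluster cluster cluster_info umbral_toneladas out) := by unfold Spec_dividir_cluster; infer_instance

-- ===== CLAIM (what is proved, stated in full; the proofs are below) =====
def Claim_equal_dividir_cluster : Prop := ∀ (cluster : List (Int × Int)) (cluster_info : List (Int × Int × List (String × Int))) (umbral_toneladas : Int), Dom_dividir_cluster cluster cluster_info umbral_toneladas → Pre_dividir_cluster cluster cluster_info umbral_toneladas → Spec_dividir_cluster cluster cluster_info umbral_toneladas (dividir_cluster cluster cluster_info umbral_toneladas)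

-- ===== LEMMAS AND PROOFS =====

-- the invariant carried by every stack entry below the root
def pvGood (u : Int) (ci : List (Int × Int × List (String × Int))) (c : List (Int × Int)) : Prop :=
  c ≠ [] ∧ c.Nodup ∧ ∀ b ∈ c, pvTon (pvInfoGet ci b) ≤ 2 * u

-- the reference result of a whole stack: A's recursion run on each entry, concatenated
def pvRun (u : Int) : List ((List (Int × Int)) × List (Int × Int × List (String × Int))) → (List (List (Int × Int))) × List Int
  | [] => ([], [])
  | (c, ci) :: rest =>
    let r := dividir_go c.length c ci u
    let r' := pvRun u rest
    (r.1 ++ r'.1, r.2 ++ r'.2)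

-- fuel needed by B's loop to drain a stack
def pvMsr (st : List ((List (Int × Int)) × List (Int × Int × List (String × Int)))) : Nat :=
  (st.map (fun p => 2 * p.1.length - 1)).sum

theorem pvSet_add_fresh {b : Int × Int} {s : List (Int × Int)} (h : b ∉ s) : PySem.Set.add s b = s ++ [b] := by
  simp [PySem.Set.add, PySem.Set.contains, h]

theorem pvDictInsert_fresh {d : List (Int × Int × List (String × Int))} {k : Int × Int} {v : List (String × Int)}
    (h : ∀ e ∈ d, ¬(e.1 = k.1 ∧ e.2.1 = k.2)) : pvDictInsert d k v = d ++ [(k.1, k.2, v)] := by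
  induction d with
  | nil => rfl
  | cons e t ih =>
    simp only [pvDictInsert, if_neg (h e (by simp))]
    simp only [List.cons_append, List.cons.injEq, true_and]
    exact ih (fun e' he' => h e' (by simp [he']))

theorem pvInfoGet_dmap {ci : List (Int × Int × List (String × Int))} {l : List (Int × Int)} {b : Int × Int}
    (h : b ∈ l) : pvInfoGet (pvDMap ci l) b = pvInfoGet ci b := by
  induction l with
  | nil => cases h
  | cons b' t ih =>
    simp only [pvDMap, List.map_cons, pvInfoGet]
    by_cases hb : b'.1 = b.1 ∧ b'.2 = b.2
    · have : b' = b := Prod.ext hb.1 hb.2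
      simp [this]
    · rw [if_neg hb]
      have hbt : b ∈ t := by
        rcases List.mem_cons.mp h with h1 | h1
        · exact absurd (by simp [h1]) hb
        · exact h1
      exact ih hbt

theorem pvTonnes?_spec {ci : List (Int × Int × List (String × Int))} {b : Int × Int} {t : Int}
    (h : pvTonnes? ci b = some t) : pvTon (pvInfoGet ci b) = t := by
  have hinner : ∀ (inner : List (String × Int)) (t' : Int), inner.lookup "TONNES" = some t' → pvTon inner = t' := by
    intro inner
    induction inner with
    | nil => intro t' h'; cases h'
    | cons e tl ih =>
      obtain ⟨k, v⟩ := e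
      intro t' h'
      simp only [List.lookup] at h'
      by_cases he : k = "TONNES"
      · subst he
        simp only [beq_self_eq_true] at h'
        cases h'
        simp [pvTon]
      · have hk : ("TONNES" == k) = false := beq_eq_false_iff_ne.mpr (fun hh => he hh.symm)
        simp only [hk] at h'
        simp only [pvTon, if_neg (show ¬((k, v).1 = "TONNES") from he)]
        exact ih t' h'
  unfold pvTonnes? at h
  cases hl : (ci.map (fun e => ((e.1, e.2.1), e.2.2))).lookup b with
  | none => rw [hl] at h; cases h
  | some v =>
    rw [hl] at h
    simp only [Option.bind_some] at h
    have hv : pvInfoGet ci b = v := by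
      clear h
      induction ci with
      | nil => cases hl
      | cons e tl ih =>
        simp only [List.map_cons, List.lookup] at hl
        by_cases he : e.1 = b.1 ∧ e.2.1 = b.2
        · have hb1 : (b == (e.1, e.2.1)) = true := beq_iff_eq.mpr (Prod.ext he.1.symm he.2.symm)
          simp only [hb1] at hl
          simp only [pvInfoGet, if_pos he]
          exact Option.some.inj hl
        · have hbne : (b == (e.1, e.2.1)) = false := beq_eq_false_iff_ne.mpr (by rintro rfl; exact he ⟨rfl, rfl⟩)
          simp only [hbne] at hl
          simp only [pvInfoGet, if_neg he]
          exact ih hl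
    rw [hv]
    exact hinner v t h

theorem pvSplitLoop_eq (ci : List (Int × Int × List (String × Int))) (p : Int × Int → Prop) [DecidablePred p]
    (c : List (Int × Int)) (h : c.Nodup) :
    pvSplitLoop ci p c = (c.filter (fun b => decide (p b)), pvDMap ci (c.filter (fun b => decide (p b))),
      c.filter (fun b => !decide (p b)), pvDMap ci (c.filter (fun b => !decide (p b)))) := by
  have key : ∀ (c' : List (Int × Int)) (s1 s2 : List (Int × Int)), c'.Nodup →
      (∀ b ∈ c', b ∉ s1) → (∀ b ∈ c', b ∉ s2) →
      c'.foldl (fun st bloque =>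
        if p bloque then
          (PySem.Set.add st.1 bloque, pvDictInsert st.2.1 bloque (pvInfoGet ci bloque), st.2.2.1, st.2.2.2)
        else
          (st.1, st.2.1, PySem.Set.add st.2.2.1 bloque, pvDictInsert st.2.2.2 bloque (pvInfoGet ci bloque)))
        (s1, pvDMap ci s1, s2, pvDMap ci s2)
      = (s1 ++ c'.filter (fun b => decide (p b)), pvDMap ci (s1 ++ c'.filter (fun b => decide (p b))),
         s2 ++ c'.filter (fun b => !decide (p b)), pvDMap ci (s2 ++ c'.filter (fun b => !decide (p b)))) := by
    intro c'
    induction c' with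
    | nil => intro s1 s2 _ _ _; simp
    | cons b t ih =>
      intro s1 s2 hnd h1 h2
      have hb1 : b ∉ s1 := h1 b (by simp)
      have hb2 : b ∉ s2 := h2 b (by simp)
      have hfresh : ∀ (s : List (Int × Int)), b ∉ s →
          pvDictInsert (pvDMap ci s) b (pvInfoGet ci b) = pvDMap ci (s ++ [b]) := by
        intro s hbs
        rw [pvDictInsert_fresh]
        · simp [pvDMap]
        · intro e he hmatch
          rcases List.mem_map.mp he with ⟨b', hb', rfl⟩
          exact hbs (by have : b' = b := Prod.ext hmatch.1 hmatch.2; rwa [this] at hb')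
      simp only [List.foldl_cons]
      by_cases hp : p b
      · rw [if_pos hp, pvSet_add_fresh hb1, hfresh s1 hb1]
        rw [ih (s1 ++ [b]) s2 (List.Nodup.of_cons hnd)
          (fun b' hb' => by
            simp only [List.mem_append, List.mem_singleton]
            rintro (hc | rfl)
            · exact h1 b' (by simp [hb']) hc
            · exact (List.nodup_cons.mp hnd).1 hb')
          (fun b' hb' => h2 b' (by simp [hb']))]
        simp [hp, List.append_assoc]
      · rw [if_neg hp, pvSet_add_fresh hb2, hfresh s2 hb2]
        rw [ih s1 (s2 ++ [b]) (List.Nodup.of_cons hnd)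
          (fun b' hb' => h1 b' (by simp [hb']))
          (fun b' hb' => by
            simp only [List.mem_append, List.mem_singleton]
            rintro (hc | rfl)
            · exact h2 b' (by simp [hb']) hc
            · exact (List.nodup_cons.mp hnd).1 hb')]
        simp [hp, List.append_assoc]
  have := key c [] [] h (by simp) (by simp)
  simpa [pvSplitLoop, pvDMap] using this

theorem pv_singleton_suma {ci : List (Int × Int × List (String × Int))} {u : Int} {c : List (Int × Int)}
    (hg : pvGood u ci c) (hs : ¬ pvSuma ci c ≤ 2 * u) : 2 ≤ c.length := by
  obtain ⟨hne, _, hb⟩ := hg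
  match c, hne with
  | [b], _ =>
    exfalso
    apply hs
    have : pvSuma ci [b] = pvTon (pvInfoGet ci b) := by simp [pvSuma]
    rw [this]
    exact hb b (by simp)
  | b1 :: b2 :: t, _ => simp
  | [], hne => exact absurd rfl hne

theorem pvMinI_le {l : List Int} {x : Int} (h : x ∈ l) : pvMinI l ≤ x := by
  unfold pvMinI
  cases hm : PySem.List.min? l (fun y => y) with
  | none => exact absurd (((PySem.List.min?_eq_none_iff l (fun y => y)).mp hm)) (List.ne_nil_of_mem h)
  | some m => simpa using PySem.List.min?_isMin hm x h

theorem pvLe_maxI {l : List Int} {x : Int} (h : x ∈ l) : x ≤ pvMaxI l := by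
  unfold pvMaxI
  cases hm : PySem.List.max? l (fun y => y) with
  | none => exact absurd (((PySem.List.max?_eq_none_iff l (fun y => y)).mp hm)) (List.ne_nil_of_mem h)
  | some m => simpa using PySem.List.max?_isMax hm x h

theorem pvMinI_mem {l : List Int} (h : l ≠ []) : pvMinI l ∈ l := by
  unfold pvMinI
  cases hm : PySem.List.min? l (fun y => y) with
  | none => exact absurd (((PySem.List.min?_eq_none_iff l (fun y => y)).mp hm)) h
  | some m => simpa using PySem.List.min?_mem hm

theorem pvMaxI_mem {l : List Int} (h : l ≠ []) : pvMaxI l ∈ l := by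
  unfold pvMaxI
  cases hm : PySem.List.max? l (fun y => y) with
  | none => exact absurd (((PySem.List.max?_eq_none_iff l (fun y => y)).mp hm)) h
  | some m => simpa using PySem.List.max?_mem hm

-- A returns the leaf regardless of fuel when the cluster is light enough
theorem pv_go_leaf {c : List (Int × Int)} {ci : List (Int × Int × List (String × Int))} {u : Int}
    (hs : pvSuma ci c ≤ 2 * u) : ∀ f, dividir_go f c ci u = ([c], [pvSuma ci c]) := by
  intro f
  cases f with
  | zero => rfl
  | succ f => simp [dividir_go, hs]

-- the children both ports produce for an overweight cluster (B's filter/map formulation)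
def pvKids (ci : List (Int × Int × List (String × Int))) (c : List (Int × Int)) :
    List (Int × Int) × List (Int × Int × List (String × Int)) × List (Int × Int) × List (Int × Int × List (String × Int)) :=
  let xs := c.map (fun b => b.1)
  let ys := c.map (fun b => b.2)
  if pvMaxI xs - pvMinI xs ≥ pvMaxI ys - pvMinI ys then
    let s := PySem.Int.floordiv (pvMinI xs + pvMaxI xs) 2
    (c.filter (fun b => decide (b.1 ≤ s)), pvDMap ci (c.filter (fun b => decide (b.1 ≤ s))),
     c.filter (fun b => !decide (b.1 ≤ s)), pvDMap ci (c.filter (fun b => !decide (b.1 ≤ s))))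
  else
    let s := PySem.Int.floordiv (pvMinI ys + pvMaxI ys) 2
    (c.filter (fun b => decide (b.2 ≤ s)), pvDMap ci (c.filter (fun b => decide (b.2 ≤ s))),
     c.filter (fun b => !decide (b.2 ≤ s)), pvDMap ci (c.filter (fun b => !decide (b.2 ≤ s))))

-- A's recursive step, phrased through pvKids
theorem pv_go_split {u : Int} {c : List (Int × Int)} {ci : List (Int × Int × List (String × Int))}
    (hnd : c.Nodup) (hs : ¬ pvSuma ci c ≤ 2 * u) (f : Nat) :
    dividir_go (f + 1) c ci u =
      ((dividir_go f (pvKids ci c).1 (pvKids ci c).2.1 u).1 ++ (dividir_go f (pvKids ci c).2.2.1 (pvKids ci c).2.2.2 u).1,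
       (dividir_go f (pvKids ci c).1 (pvKids ci c).2.1 u).2 ++ (dividir_go f (pvKids ci c).2.2.1 (pvKids ci c).2.2.2 u).2) := by
  have hstep : ∀ (sub : List (Int × Int)) (si : List (Int × Int × List (String × Int))),
      (if 2 * u < pvSuma si sub then dividir_go f sub si u else ([sub], [pvSuma si sub])) = dividir_go f sub si u := by
    intro sub si
    by_cases h : 2 * u < pvSuma si sub
    · rw [if_pos h]
    · rw [if_neg h, pv_go_leaf (not_lt.mp h) f]
  by_cases hc : pvMaxI (c.map (fun b => b.1)) - pvMinI (c.map (fun b => b.1)) ≥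
      pvMaxI (c.map (fun b => b.2)) - pvMinI (c.map (fun b => b.2))
  · have hc' : pvMaxI (c.map (fun b => b.1)) - pvMinI (c.map (fun b => b.1)) + 1 ≥
        pvMaxI (c.map (fun b => b.2)) - pvMinI (c.map (fun b => b.2)) + 1 := by omega
    simp only [dividir_go, pvKids, if_neg hs, if_pos hc, if_pos hc', pvSplitLoop_eq ci _ c hnd, hstep]
  · have hc' : ¬(pvMaxI (c.map (fun b => b.1)) - pvMinI (c.map (fun b => b.1)) + 1 ≥
        pvMaxI (c.map (fun b => b.2)) - pvMinI (c.map (fun b => b.2)) + 1) := by omega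
    simp only [dividir_go, pvKids, if_neg hs, if_neg hc, if_neg hc', pvSplitLoop_eq ci _ c hnd, hstep]

-- the children of an overweight good cluster are good and partition it
theorem pv_kids_spec {u : Int} {c : List (Int × Int)} {ci : List (Int × Int × List (String × Int))}
    (hg : pvGood u ci c) (hs : ¬ pvSuma ci c ≤ 2 * u) :
    pvGood u (pvKids ci c).2.1 (pvKids ci c).1 ∧ pvGood u (pvKids ci c).2.2.2 (pvKids ci c).2.2.1 ∧
    (pvKids ci c).1.length + (pvKids ci c).2.2.1.length = c.length := by
  obtain ⟨hne, hnd, htons⟩ := hg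
  have h2 : 2 ≤ c.length := pv_singleton_suma ⟨hne, hnd, htons⟩ hs
  have child : ∀ (p : Int × Int → Bool) (w : Int × Int), w ∈ c → p w = true →
      pvGood u (pvDMap ci (c.filter p)) (c.filter p) := by
    intro p w hw hpw
    refine ⟨List.ne_nil_of_mem (List.mem_filter.mpr ⟨hw, hpw⟩), List.Nodup.filter p hnd, ?_⟩
    intro b hb
    rw [pvInfoGet_dmap hb]
    exact htons b (List.mem_filter.mp hb).1
  have hlen : ∀ p : Int × Int → Bool,
      (c.filter p).length + (c.filter (fun b => !p b)).length = c.length :=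
    fun p => (List.length_eq_length_filter_add p).symm
  -- two distinct points
  obtain ⟨a, c', rfl⟩ := List.exists_cons_of_ne_nil hne
  obtain ⟨b₀, t, rfl⟩ := List.exists_cons_of_ne_nil
    (show c' ≠ [] by rintro rfl; simp at h2)
  have hab : a ≠ b₀ := by
    intro h; exact (List.nodup_cons.mp hnd).1 (by simp [h])
  -- notation
  by_cases hc : pvMaxI ((a :: b₀ :: t).map (fun b => b.1)) - pvMinI ((a :: b₀ :: t).map (fun b => b.1)) ≥
      pvMaxI ((a :: b₀ :: t).map (fun b => b.2)) - pvMinI ((a :: b₀ :: t).map (fun b => b.2))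
  · have hlt : pvMinI ((a :: b₀ :: t).map (fun b => b.1)) < pvMaxI ((a :: b₀ :: t).map (fun b => b.1)) := by
      by_contra hle
      apply hab
      have hx1 := pvMinI_le (show a.1 ∈ (a :: b₀ :: t).map (fun b => b.1) by simp)
      have hx2 := pvLe_maxI (show a.1 ∈ (a :: b₀ :: t).map (fun b => b.1) by simp)
      have hx3 := pvMinI_le (show b₀.1 ∈ (a :: b₀ :: t).map (fun b => b.1) by simp)
      have hx4 := pvLe_maxI (show b₀.1 ∈ (a :: b₀ :: t).map (fun b => b.1) by simp)
      have hy1 := pvMinI_le (show a.2 ∈ (a :: b₀ :: t).map (fun b => b.2) by simp)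
      have hy2 := pvLe_maxI (show a.2 ∈ (a :: b₀ :: t).map (fun b => b.2) by simp)
      have hy3 := pvMinI_le (show b₀.2 ∈ (a :: b₀ :: t).map (fun b => b.2) by simp)
      have hy4 := pvLe_maxI (show b₀.2 ∈ (a :: b₀ :: t).map (fun b => b.2) by simp)
      exact Prod.ext (by omega) (by omega)
    have hsb : pvMinI ((a :: b₀ :: t).map (fun b => b.1)) ≤
          PySem.Int.floordiv (pvMinI ((a :: b₀ :: t).map (fun b => b.1)) + pvMaxI ((a :: b₀ :: t).map (fun b => b.1))) 2 ∧
        PySem.Int.floordiv (pvMinI ((a :: b₀ :: t).map (fun b => b.1)) + pvMaxI ((a :: b₀ :: t).map (fun b => b.1))) 2 <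
          pvMaxI ((a :: b₀ :: t).map (fun b => b.1)) := by
      rw [PySem.Int.floordiv_eq_ediv_of_pos (by norm_num)]
      omega
    obtain ⟨wmin, hwmin, hwmin1⟩ := List.mem_map.mp (pvMinI_mem (show (a :: b₀ :: t).map (fun b => b.1) ≠ [] by simp))
    obtain ⟨wmax, hwmax, hwmax1⟩ := List.mem_map.mp (pvMaxI_mem (show (a :: b₀ :: t).map (fun b => b.1) ≠ [] by simp))
    simp only [pvKids, if_pos hc]
    refine ⟨child _ wmin hwmin (by rw [decide_eq_true_eq]; omega),
            child _ wmax hwmax (by simp only [Bool.not_eq_true']; rw [decide_eq_false_iff_not]; omega),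
            hlen _⟩
  · have hlt : pvMinI ((a :: b₀ :: t).map (fun b => b.2)) < pvMaxI ((a :: b₀ :: t).map (fun b => b.2)) := by
      by_contra hle
      apply hab
      have hx1 := pvMinI_le (show a.1 ∈ (a :: b₀ :: t).map (fun b => b.1) by simp)
      have hx2 := pvLe_maxI (show a.1 ∈ (a :: b₀ :: t).map (fun b => b.1) by simp)
      have hx3 := pvMinI_le (show b₀.1 ∈ (a :: b₀ :: t).map (fun b => b.1) by simp)
      have hx4 := pvLe_maxI (show b₀.1 ∈ (a :: b₀ :: t).map (fun b => b.1) by simp)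
      have hy1 := pvMinI_le (show a.2 ∈ (a :: b₀ :: t).map (fun b => b.2) by simp)
      have hy2 := pvLe_maxI (show a.2 ∈ (a :: b₀ :: t).map (fun b => b.2) by simp)
      have hy3 := pvMinI_le (show b₀.2 ∈ (a :: b₀ :: t).map (fun b => b.2) by simp)
      have hy4 := pvLe_maxI (show b₀.2 ∈ (a :: b₀ :: t).map (fun b => b.2) by simp)
      exact Prod.ext (by omega) (by omega)
    have hsb : pvMinI ((a :: b₀ :: t).map (fun b => b.2)) ≤
          PySem.Int.floordiv (pvMinI ((a :: b₀ :: t).map (fun b => b.2)) + pvMaxI ((a :: b₀ :: t).map (fun b => b.2))) 2 ∧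
        PySem.Int.floordiv (pvMinI ((a :: b₀ :: t).map (fun b => b.2)) + pvMaxI ((a :: b₀ :: t).map (fun b => b.2))) 2 <
          pvMaxI ((a :: b₀ :: t).map (fun b => b.2)) := by
      rw [PySem.Int.floordiv_eq_ediv_of_pos (by norm_num)]
      omega
    obtain ⟨wmin, hwmin, hwmin1⟩ := List.mem_map.mp (pvMinI_mem (show (a :: b₀ :: t).map (fun b => b.2) ≠ [] by simp))
    obtain ⟨wmax, hwmax, hwmax1⟩ := List.mem_map.mp (pvMaxI_mem (show (a :: b₀ :: t).map (fun b => b.2) ≠ [] by simp))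
    simp only [pvKids, if_neg hc]
    refine ⟨child _ wmin hwmin (by rw [decide_eq_true_eq]; omega),
            child _ wmax hwmax (by simp only [Bool.not_eq_true']; rw [decide_eq_false_iff_not]; omega),
            hlen _⟩

-- A's value does not depend on the fuel while the fuel dominates the cluster size
theorem pv_go_fuel {u : Int} : ∀ n c ci f₁ f₂, c.length ≤ n → pvGood u ci c → c.length ≤ f₁ → c.length ≤ f₂ →
    dividir_go f₁ c ci u = dividir_go f₂ c ci u := by
  intro n
  induction n with
  | zero =>
    intro c ci f₁ f₂ hn hg _ _
    exact absurd (List.eq_nil_of_length_eq_zero (by omega)) hg.1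
  | succ n ih =>
    intro c ci f₁ f₂ hn hg h1 h2
    by_cases hsle : pvSuma ci c ≤ 2 * u
    · rw [pv_go_leaf hsle, pv_go_leaf hsle]
    · have h2c := pv_singleton_suma hg hsle
      obtain ⟨g₁, rfl⟩ : ∃ g, f₁ = g + 1 := ⟨f₁ - 1, by omega⟩
      obtain ⟨g₂, rfl⟩ : ∃ g, f₂ = g + 1 := ⟨f₂ - 1, by omega⟩
      obtain ⟨gd1, gd2, hlen⟩ := pv_kids_spec hg hsle
      have hp1 : 0 < (pvKids ci c).1.length := List.length_pos_of_ne_nil gd1.1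
      have hp2 : 0 < (pvKids ci c).2.2.1.length := List.length_pos_of_ne_nil gd2.1
      rw [pv_go_split hg.2.1 hsle g₁, pv_go_split hg.2.1 hsle g₂,
        ih _ _ g₁ g₂ (by omega) gd1 (by omega) (by omega),
        ih _ _ g₁ g₂ (by omega) gd2 (by omega) (by omega)]

-- B's loop drains the stack to the concatenation of A's results
theorem pv_alt_run {u : Int} : ∀ f st acc, (∀ p ∈ st, pvGood u p.2 p.1) → pvMsr st ≤ f →
    dividir_alt_loop f st u acc = (acc.1 ++ (pvRun u st).1, acc.2 ++ (pvRun u st).2) := by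
  intro f
  induction f with
  | zero =>
    intro st acc hg hm
    cases st with
    | nil => simp [dividir_alt_loop, pvRun]
    | cons p rest =>
      exfalso
      have := List.length_pos_of_ne_nil (hg p (by simp)).1
      simp only [pvMsr, List.map_cons, List.sum_cons] at hm
      omega
  | succ g ih =>
    intro st acc hg hm
    cases st with
    | nil => simp [dividir_alt_loop, pvRun]
    | cons p rest =>
      obtain ⟨c, ci⟩ := p
      have hgc : pvGood u ci c := hg (c, ci) (by simp)
      have hndc := hgc.2.1
      have hlc : 0 < c.length := List.length_pos_of_ne_nil hgc.1
      have hgrest : ∀ q ∈ rest, pvGood u q.2 q.1 := fun q hq => hg q (by simp [hq])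
      have hmc : 2 * c.length - 1 + pvMsr rest ≤ g + 1 := by
        simpa [pvMsr] using hm
      by_cases hsle : pvSuma ci c ≤ 2 * u
      · simp only [dividir_alt_loop, if_pos hsle]
        rw [ih rest _ hgrest (by omega)]
        simp [pvRun, pv_go_leaf hsle]
      · have h2c := pv_singleton_suma hgc hsle
        obtain ⟨gd1, gd2, hlen⟩ := pv_kids_spec hgc hsle
        have hp1 := List.length_pos_of_ne_nil gd1.1
        have hp2 := List.length_pos_of_ne_nil gd2.1
        have hof : ∀ p : Int × Int → Bool, PySem.Set.ofList (c.filter p) = c.filter p :=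
          fun p => PySem.Set.ofList_eq_self_of_nodup _ (List.Nodup.filter p hndc)
        have hneg1 : ∀ s : Int, (fun (b : Int × Int) => decide (s < b.1)) = (fun b => !decide (b.1 ≤ s)) := by
          intro s; funext b; rw [← decide_not]; exact decide_eq_decide.mpr (by omega)
        have hneg2 : ∀ s : Int, (fun (b : Int × Int) => decide (s < b.2)) = (fun b => !decide (b.2 ≤ s)) := by
          intro s; funext b; rw [← decide_not]; exact decide_eq_decide.mpr (by omega)
        have hstep : dividir_alt_loop (g + 1) ((c, ci) :: rest) u acc
            = dividir_alt_loop g (((pvKids ci c).1, (pvKids ci c).2.1) ::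
                ((pvKids ci c).2.2.1, (pvKids ci c).2.2.2) :: rest) u acc := by
          by_cases hc : pvMaxI (c.map (fun b => b.1)) - pvMinI (c.map (fun b => b.1)) ≥
              pvMaxI (c.map (fun b => b.2)) - pvMinI (c.map (fun b => b.2))
          · simp only [dividir_alt_loop, if_neg hsle, if_pos hc, pvKids, hneg1, hof]
          · simp only [dividir_alt_loop, if_neg hsle, if_neg hc, pvKids, hneg2, hof]
        rw [hstep, ih _ _ ?inv ?msr]
        case inv =>
          intro q hq
          rcases List.mem_cons.mp hq with rfl | hq'
          · exact gd1
          rcases List.mem_cons.mp hq' with rfl | hq''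
          · exact gd2
          · exact hgrest q hq''
        case msr =>
          simp only [pvMsr, List.map_cons, List.sum_cons]
          simp only [pvMsr] at hmc
          omega
        have hgo : dividir_go c.length c ci u =
            ((dividir_go (pvKids ci c).1.length (pvKids ci c).1 (pvKids ci c).2.1 u).1 ++
              (dividir_go (pvKids ci c).2.2.1.length (pvKids ci c).2.2.1 (pvKids ci c).2.2.2 u).1,
             (dividir_go (pvKids ci c).1.length (pvKids ci c).1 (pvKids ci c).2.1 u).2 ++
              (dividir_go (pvKids ci c).2.2.1.length (pvKids ci c).2.2.1 (pvKids ci c).2.2.2 u).2) := by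
          obtain ⟨m, hm'⟩ : ∃ m, c.length = m + 1 := ⟨c.length - 1, by omega⟩
          rw [hm', pv_go_split hndc hsle m,
            pv_go_fuel c.length _ _ m (pvKids ci c).1.length (by omega) gd1 (by omega) (by omega),
            pv_go_fuel c.length _ _ m (pvKids ci c).2.2.1.length (by omega) gd2 (by omega) (by omega)]
        simp [pvRun, hgo, List.append_assoc]

-- ===== VERDICT (by name: the statement is the Claim_ definition above) =====
theorem dividir_cluster_spec : Claim_equal_dividir_cluster := by
  intro c ci u _ hpre
  obtain ⟨hnd, hemp, hb⟩ := hpre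
  unfold Spec_dividir_cluster dividir_cluster dividir_cluster_alt
  by_cases hne : c = []
  · subst hne
    have h0 : (0 : Int) ≤ 2 * u := by have := hemp rfl; omega
    simp [dividir_go, dividir_alt_loop, pvSuma, h0]
  · have hgood : pvGood u ci c := by
      refine ⟨hne, hnd, fun b hbc => ?_⟩
      obtain ⟨hn0, hle⟩ := hb b hbc
      cases h : pvTonnes? ci b with
      | none => exact absurd h hn0
      | some t => rw [pvTonnes?_spec h]; rw [h] at hle; simpa using hle
    have hlc : 0 < c.length := List.length_pos_of_ne_nil hne
    rw [pv_alt_run (2 * c.length + 1) [(c, ci)] ([], [])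
      (by rintro q hq; rcases List.mem_singleton.mp hq with rfl; exact hgood)
      (by simp only [pvMsr, List.map_cons, List.map_nil, List.sum_cons, List.sum_nil]; omega)]
    simp [pvRun]
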